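-- pv_equiv track=rewrite | github.com/Phoenixcoder-6/Coding_interview_series | Cognizant/Dutch National Flag problem.py | dutch
-- ===== SOURCE A (Python) =====
-- def dutch(arr):
--     front=[]
--     middle=[]
--     last=[]
--     for i in arr:
--         if i==0:
--             front.append(i)
--         elif i==1:
--             middle.append(i)
--         else:
--             last.append(i)
--
--     return front+middle+last
-- ===== SOURCE B (Python) =====
-- def dutch(arr):
--     return sorted(arr, key=lambda x: 0 if x == 0 else (1 if x == 1 else 2))
-- ===== Notes on version B (the rewrite author's own statement) =====
-- stated objective: idiomatic
-- what changed: Replaces the three-bucket append loop with a single stable sorted() call keyed 0/1/2, which reproduces the bucket order by stability.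
import Mathlib
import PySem

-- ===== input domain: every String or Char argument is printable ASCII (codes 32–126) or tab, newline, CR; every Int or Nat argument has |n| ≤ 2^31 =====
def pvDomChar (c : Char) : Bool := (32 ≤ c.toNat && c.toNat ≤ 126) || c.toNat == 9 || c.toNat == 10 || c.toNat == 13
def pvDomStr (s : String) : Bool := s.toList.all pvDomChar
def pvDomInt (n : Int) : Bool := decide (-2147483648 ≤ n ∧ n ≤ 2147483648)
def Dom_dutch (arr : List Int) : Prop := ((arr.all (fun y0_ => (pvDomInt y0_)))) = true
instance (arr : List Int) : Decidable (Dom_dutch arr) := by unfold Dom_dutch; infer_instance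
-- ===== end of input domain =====

-- B replaces A's three-bucket append loop with one stable sorted() call keyed 0/1/2 (idiomatic; same return value).

-- ===== PORT A =====
-- A: one pass appending each element to front/middle/last, then front+middle+last.
def dutch (arr : List Int) : List Int :=
  let st := arr.foldl
    (fun (acc : List Int × List Int × List Int) i =>
      if i = 0 then (acc.1 ++ [i], acc.2.1, acc.2.2)
      else if i = 1 then (acc.1, acc.2.1 ++ [i], acc.2.2)
      else (acc.1, acc.2.1, acc.2.2 ++ [i]))
    ([], [], [])
  st.1 ++ st.2.1 ++ st.2.2

-- ===== PORT B =====
-- B: sorted(arr, key=lambda x: 0 if x == 0 else (1 if x == 1 else 2))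
def dutch_alt (arr : List Int) : List Int :=
  PySem.List.sorted arr (fun x => if x = 0 then (0 : Int) else if x = 1 then 1 else 2) false

-- ===== PRECONDITION & SPEC =====
def Spec_dutch (arr : List Int) (out : List Int) : Prop := out = dutch_alt arr
instance (arr : List Int) (out : List Int) : Decidable (Spec_dutch arr out) := by unfold Spec_dutch; infer_instance

-- ===== CLAIM (what is proved, stated in full; the proofs are below) =====
def Claim_equal_dutch : Prop := ∀ (arr : List Int), Dom_dutch arr → Spec_dutch arr (dutch arr)

-- ===== LEMMAS AND PROOFS =====

def pvKey (x : Int) : Int := if x = 0 then 0 else if x = 1 then 1 else 2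

theorem pvKey_eq0 {x : Int} (h : x = 0) : pvKey x = 0 := by simp [pvKey, h]
theorem pvKey_eq1 {x : Int} (h1 : x = 1) : pvKey x = 1 := by simp [pvKey, h1]
theorem pvKey_eq2 {x : Int} (h0 : x ≠ 0) (h1 : x ≠ 1) : pvKey x = 2 := by simp [pvKey, h0, h1]

def pvF0 (arr : List Int) : List Int := arr.filter (fun a => decide (a = 0))
def pvF1 (arr : List Int) : List Int := arr.filter (fun a => decide (a = 1))
def pvF2 (arr : List Int) : List Int := arr.filter (fun a => decide (a ≠ 0 ∧ a ≠ 1))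

-- A's loop, characterized
theorem dutch_loop (arr : List Int) (f m l : List Int) :
    arr.foldl
      (fun (acc : List Int × List Int × List Int) i =>
        if i = 0 then (acc.1 ++ [i], acc.2.1, acc.2.2)
        else if i = 1 then (acc.1, acc.2.1 ++ [i], acc.2.2)
        else (acc.1, acc.2.1, acc.2.2 ++ [i]))
      (f, m, l)
    = (f ++ pvF0 arr, m ++ pvF1 arr, l ++ pvF2 arr) := by
  induction arr generalizing f m l with
  | nil => simp [pvF0, pvF1, pvF2]
  | cons x t ih =>
    by_cases h0 : x = 0
    · simp [List.foldl_cons, h0, ih, pvF0, pvF1, pvF2, List.filter_cons]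
    · by_cases h1 : x = 1
      · simp [List.foldl_cons, h0, h1, ih, pvF0, pvF1, pvF2, List.filter_cons]
      · simp [List.foldl_cons, h0, h1, ih, pvF0, pvF1, pvF2, List.filter_cons]

theorem dutch_eq_filters (arr : List Int) :
    dutch arr = pvF0 arr ++ pvF1 arr ++ pvF2 arr := by
  simp [dutch, dutch_loop]

-- insertBy helpers
theorem insertBy_skip (before : Int → Int → Bool) (x : Int) (ys zs : List Int)
    (h : ∀ y ∈ ys, before x y = false) :
    PySem.List.insertBy before x (ys ++ zs) = ys ++ PySem.List.insertBy before x zs := by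
  induction ys with
  | nil => simp
  | cons y t ih =>
    have hy : before x y = false := h y (by simp)
    simp [PySem.List.insertBy, hy, ih (fun a ha => h a (by simp [ha]))]

theorem insertBy_front (before : Int → Int → Bool) (x : Int) (zs : List Int)
    (h : ∀ y ∈ zs, before x y = true) :
    PySem.List.insertBy before x zs = x :: zs := by
  cases zs with
  | nil => rfl
  | cons z t => simp [PySem.List.insertBy, h z (by simp)]

-- membership facts about the filters
-- B's insertion sort, characterized with the same filters
theorem sorted_loop (arr : List Int) (f0 f1 f2 : List Int)
    (h0 : ∀ a ∈ f0, pvKey a = 0) (h1 : ∀ a ∈ f1, pvKey a = 1) (h2 : ∀ a ∈ f2, pvKey a = 2) :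
    arr.foldl
      (fun acc x => PySem.List.insertBy (fun a b => decide (pvKey a < pvKey b)) x acc)
      (f0 ++ f1 ++ f2)
    = (f0 ++ pvF0 arr) ++ (f1 ++ pvF1 arr) ++ (f2 ++ pvF2 arr) := by
  induction arr generalizing f0 f1 f2 with
  | nil => simp [pvF0, pvF1, pvF2]
  | cons x t ih =>
    rw [List.foldl_cons]
    by_cases hx0 : x = 0
    · have step : PySem.List.insertBy (fun a b => decide (pvKey a < pvKey b)) x (f0 ++ f1 ++ f2)
          = (f0 ++ [x]) ++ f1 ++ f2 := by
        rw [List.append_assoc, insertBy_skip _ _ f0 (f1 ++ f2)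
            (fun y hy => by show decide (pvKey x < pvKey y) = false; rw [pvKey_eq0 hx0, h0 y hy]; decide),
          insertBy_front _ _ (f1 ++ f2) (fun y hy => by
            show decide (pvKey x < pvKey y) = true
            rcases List.mem_append.mp hy with hy | hy
            · rw [pvKey_eq0 hx0, h1 y hy]; decide
            · rw [pvKey_eq0 hx0, h2 y hy]; decide)]
        simp
      rw [step, ih (f0 ++ [x]) f1 f2
        (fun a ha => by rcases List.mem_append.mp ha with ha | ha
                        · exact h0 a ha
                        · simp at ha; rw [ha]; exact pvKey_eq0 hx0) h1 h2]
      simp [pvF0, pvF1, pvF2, List.filter_cons, hx0]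
    · by_cases hx1 : x = 1
      · have step : PySem.List.insertBy (fun a b => decide (pvKey a < pvKey b)) x (f0 ++ f1 ++ f2)
            = f0 ++ (f1 ++ [x]) ++ f2 := by
          rw [List.append_assoc, insertBy_skip _ _ f0 (f1 ++ f2)
              (fun y hy => by show decide (pvKey x < pvKey y) = false; rw [pvKey_eq1 hx1, h0 y hy]; decide),
            insertBy_skip _ _ f1 f2
              (fun y hy => by show decide (pvKey x < pvKey y) = false; rw [pvKey_eq1 hx1, h1 y hy]; decide),
            insertBy_front _ _ f2 (fun y hy => by show decide (pvKey x < pvKey y) = true; rw [pvKey_eq1 hx1, h2 y hy]; decide)]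
          simp
        rw [step, ih f0 (f1 ++ [x]) f2 h0
          (fun a ha => by rcases List.mem_append.mp ha with ha | ha
                          · exact h1 a ha
                          · simp at ha; rw [ha]; exact pvKey_eq1 hx1) h2]
        simp [pvF0, pvF1, pvF2, List.filter_cons, hx0, hx1]
      · have step : PySem.List.insertBy (fun a b => decide (pvKey a < pvKey b)) x (f0 ++ f1 ++ f2)
            = f0 ++ f1 ++ (f2 ++ [x]) := by
          rw [PySem.List.insertBy_of_forall_not_before _ _ _ (fun y hy => by
            show decide (pvKey x < pvKey y) = false
            rw [pvKey_eq2 hx0 hx1]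
            rcases List.mem_append.mp hy with hy | hy
            · rcases List.mem_append.mp hy with hy | hy
              · rw [h0 y hy]; decide
              · rw [h1 y hy]; decide
            · rw [h2 y hy]; decide)]
          simp
        rw [step, ih f0 f1 (f2 ++ [x]) h0 h1
          (fun a ha => by rcases List.mem_append.mp ha with ha | ha
                          · exact h2 a ha
                          · simp at ha; rw [ha]; exact pvKey_eq2 hx0 hx1)]
        simp [pvF0, pvF1, pvF2, List.filter_cons, hx0, hx1]

theorem dutch_alt_eq_filters (arr : List Int) :
    dutch_alt arr = pvF0 arr ++ pvF1 arr ++ pvF2 arr := by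
  have h : dutch_alt arr
      = arr.foldl (fun acc x => PySem.List.insertBy (fun a b => decide (pvKey a < pvKey b)) x acc) [] := by
    simpa [pvKey] using
      PySem.List.sorted_eq_foldl_insertBy arr (fun x => if x = 0 then (0 : Int) else if x = 1 then 1 else 2)
  rw [h]
  have := sorted_loop arr [] [] [] (by simp) (by simp) (by simp)
  simpa using this

-- ===== VERDICT (by name: the statement is the Claim_ definition above) =====
theorem dutch_spec : Claim_equal_dutch := by
  intro arr _
  unfold Spec_dutch
  rw [dutch_eq_filters, dutch_alt_eq_filters]
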